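-- pv_equiv track=rewrite | github.com/ackendal/transcriptTools | word_count.py | print_words
-- ===== SOURCE A (Python) =====
-- def check_counts(input, count):
-- 	num = 0
-- 	for word in input:
-- 		if(len(word) == count):
-- 			num = num + 1
-- 	return num
--
-- def print_words(input, count):
-- 	output = "(words: "
-- 	num = check_counts(input, count)
-- 	index = 0
-- 	if(num == 0):
-- 		return;
-- 	elif(num == 1):
-- 		for word in input:
-- 			if(len(word) == count):
-- 				output += ("\"" + word + "\")")
-- 	elif(num == 2):
-- 		for word in input:
-- 			if((len(word) == count) and (index < (num - 1))):
-- 				output += ("\"" + word + "\" ")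
-- 				index = index + 1
-- 			elif(len(word) == count):
-- 				output += ("and \"" + word + "\")")
-- 	else:
-- 		for word in input:
-- 			if((len(word) == count) and (index < (num - 2))):
-- 				output += ("\"" + word + "\", ")
-- 				index = index + 1
-- 			elif((len(word) == count) and (index < (num - 1))):
-- 				output += ("\"" + word + "\" ")
-- 				index = index + 1
-- 			elif(len(word) == count):
-- 				output += ("and \"" + word + "\")")
-- 	return output
-- ===== SOURCE B (Python) =====
-- def print_words(input, count):
--     matches = [w for w in input if len(w) == count]
--     if not matches:
--         return
--     quoted = ['"' + w + '"' for w in matches]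
--     if len(quoted) == 1:
--         body = quoted[0]
--     else:
--         body = ', '.join(quoted[:-1]) + ' and ' + quoted[-1]
--     return '(words: ' + body + ')'
-- ===== Notes on version B (the rewrite author's own statement) =====
-- stated objective: simpler
-- what changed: B filters the matching words once and assembles the result by joining the quoted words[:-1] with ', ' plus ' and ' and the last one, replacing A's count-first pass and second index-threaded loop with three positional branch ladders.
import Mathlib
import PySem

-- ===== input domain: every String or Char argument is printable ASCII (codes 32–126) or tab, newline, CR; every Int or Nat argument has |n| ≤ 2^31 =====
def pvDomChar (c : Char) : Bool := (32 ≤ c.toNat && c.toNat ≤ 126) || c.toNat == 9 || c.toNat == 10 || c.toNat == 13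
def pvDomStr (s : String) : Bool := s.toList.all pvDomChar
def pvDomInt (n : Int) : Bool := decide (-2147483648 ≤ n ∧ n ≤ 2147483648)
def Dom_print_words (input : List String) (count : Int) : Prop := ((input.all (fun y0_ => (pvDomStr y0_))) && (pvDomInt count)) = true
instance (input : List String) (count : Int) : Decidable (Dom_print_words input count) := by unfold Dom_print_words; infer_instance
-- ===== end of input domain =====

-- B rewrite: filter the matching words once, then assemble «", ".join of quoted words[:-1] + ' and ' + last»
-- instead of A's count-then-reloop with positional index branching (objective: simpler).

-- ===== PORT A =====
def check_counts (input : List String) (count : Int) : Int :=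
  input.foldl (fun num word => if PySem.Str.len word == count then num + 1 else num) 0

def print_words (input : List String) (count : Int) : Option String :=
  let output : List Char := "(words: ".toList
  let num := check_counts input count
  if num = 0 then
    none
  else if num = 1 then
    some (String.ofList (input.foldl (fun o word =>
      if PySem.Str.len word == count then o ++ ('"' :: word.toList ++ ['"', ')']) else o) output))
  else if num = 2 then
    some (String.ofList ((input.foldl (fun (s : List Char × Int) word =>
      if (PySem.Str.len word == count) ∧ s.2 < num - 1 then
        (s.1 ++ ('"' :: word.toList ++ ['"', ' ']), s.2 + 1)
      else if PySem.Str.len word == count then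
        (s.1 ++ ("and \"".toList ++ word.toList ++ ['"', ')']), s.2)
      else s) (output, 0)).1))
  else
    some (String.ofList ((input.foldl (fun (s : List Char × Int) word =>
      if (PySem.Str.len word == count) ∧ s.2 < num - 2 then
        (s.1 ++ ('"' :: word.toList ++ ['"', ',', ' ']), s.2 + 1)
      else if (PySem.Str.len word == count) ∧ s.2 < num - 1 then
        (s.1 ++ ('"' :: word.toList ++ ['"', ' ']), s.2 + 1)
      else if PySem.Str.len word == count then
        (s.1 ++ ("and \"".toList ++ word.toList ++ ['"', ')']), s.2)
      else s) (output, 0)).1))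

-- ===== PORT B =====
def print_words_alt (input : List String) (count : Int) : Option String :=
  let matched := input.filter (fun w => PySem.Str.len w == count)
  if matched = [] then
    none
  else
    let quoted := matched.map (fun w => '"' :: (w.toList ++ ['"']))
    let body :=
      if quoted.length = 1 then
        PySem.List.pyGetD quoted 0 []
      else
        PySem.Chars.join ", ".toList (PySem.List.slice quoted none (some (-1)))
          ++ " and ".toList ++ PySem.List.pyGetD quoted (-1) []
    some (String.ofList ("(words: ".toList ++ body ++ [')']))

-- ===== PRECONDITION & SPEC =====
def Spec_print_words (input : List String) (count : Int) (out : Option String) : Prop := out = print_words_alt input count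
instance (input : List String) (count : Int) (out : Option String) : Decidable (Spec_print_words input count out) := by unfold Spec_print_words; infer_instance

-- ===== CLAIM (what is proved, stated in full; the proofs are below) =====
def Claim_equal_print_words : Prop := ∀ (input : List String) (count : Int), Dom_print_words input count → Spec_print_words input count (print_words input count)

-- ===== LEMMAS AND PROOFS =====

def pwQt (w : String) : List Char := '"' :: (w.toList ++ ['"'])
def pwRest : List String → List Char
  | [] => []
  | [w] => "and \"".toList ++ (w.toList ++ ['"', ')'])
  | [w, v] => pwQt w ++ [' '] ++ pwRest [v]
  | w :: v :: u :: t => pwQt w ++ [',', ' '] ++ pwRest (v :: u :: t)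

lemma pwLoop3 (n : Int) :
    ∀ (ms : List String) (acc : List Char) (idx : Int), ms ≠ [] → idx + ms.length = n →
    ms.foldl (fun (s : List Char × Int) w =>
      if s.2 < n - 2 then (s.1 ++ ('"' :: w.toList ++ ['"', ',', ' ']), s.2 + 1)
      else if s.2 < n - 1 then (s.1 ++ ('"' :: w.toList ++ ['"', ' ']), s.2 + 1)
      else (s.1 ++ ("and \"".toList ++ w.toList ++ ['"', ')']), s.2)) (acc, idx)
      = (acc ++ pwRest ms, n - 1) := by
  intro ms
  induction ms using pwRest.induct with
  | case1 =>
    intro _ _ h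
    exact absurd rfl h
  | case2 w =>
    intro acc idx _ hlen
    simp only [List.length_cons, List.length_nil] at hlen
    have h1 : ¬ idx < n - 2 := by omega
    have h2 : ¬ idx < n - 1 := by omega
    simp [List.foldl, h1, h2, pwRest]
    omega
  | case3 w v =>
    intro acc idx _ hlen
    simp only [List.length_cons, List.length_nil] at hlen
    have h1 : ¬ idx < n - 2 := by omega
    have h2 : idx < n - 1 := by omega
    have h3 : ¬ idx + 1 < n - 2 := by omega
    have h4 : ¬ idx + 1 < n - 1 := by omega
    simp [List.foldl, h1, h2, h3, h4, pwRest, pwQt]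
    omega
  | case4 w v u t ih =>
    intro acc idx _ hlen
    simp only [List.length_cons] at hlen ⊢
    have h1 : idx < n - 2 := by omega
    rw [List.foldl_cons]
    simp only [h1, if_pos]
    rw [ih _ _ (by simp) (by simp only [List.length_cons] at hlen ⊢; push_cast at hlen ⊢; omega)]
    simp [pwRest, pwQt, List.append_assoc]

lemma pwJoin_eq_rest (w v : String) (t : List String) :
    PySem.Chars.join ", ".toList (((w :: v :: t).map pwQt).dropLast)
      ++ " and ".toList ++ ((w :: v :: t).map pwQt).getLast (by simp) ++ [')']
      = pwRest (w :: v :: t) := by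
  induction t generalizing w v with
  | nil =>
    simp [pwRest, pwQt, PySem.Chars.join_singleton]
  | cons u t ih =>
    have hd : ((w :: v :: u :: t).map pwQt).dropLast = pwQt w :: ((v :: u :: t).map pwQt).dropLast := by
      simp
    have hg : ((w :: v :: u :: t).map pwQt).getLast (by simp) = ((v :: u :: t).map pwQt).getLast (by simp) := by
      simp [List.getLast_cons]
    rw [hd, hg]
    have hne : ((v :: u :: t).map pwQt).dropLast = pwQt v :: ((u :: t).map pwQt).dropLast := by simp
    rw [hne, PySem.Chars.join_cons_cons, ← hne]
    have := ih v u
    rw [show pwRest (w :: v :: u :: t) = pwQt w ++ [',', ' '] ++ pwRest (v :: u :: t) from rfl, ← this]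
    simp [List.append_assoc]


theorem print_words_eq (input : List String) (count : Int) :
    print_words input count = print_words_alt input count := by
  have hnum : check_counts input count
      = ((input.filter (fun w => PySem.Str.len w == count)).length : Int) := by
    unfold check_counts
    rw [PySem.List.foldl_if_add_one, List.countP_eq_length_filter]
    ring
  rcases hms : input.filter (fun w => PySem.Str.len w == count) with _ | ⟨w, t⟩
  · -- no match: both none
    simp only [print_words, print_words_alt]
    rw [hnum, hms]
    norm_num
  · rcases t with _ | ⟨v, t⟩
    · -- exactly one match
      have hA : input.foldl (fun o word =>
          if PySem.Str.len word == count then o ++ ('"' :: word.toList ++ ['"', ')']) else o)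
          "(words: ".toList
          = "(words: ".toList ++ ('"' :: w.toList ++ ['"', ')']) := by
        rw [PySem.List.foldl_if_eq_foldl_filter, hms]
        rfl
      simp only [print_words, print_words_alt]
      rw [hnum, hms, hA]
      norm_num
    · -- two or more matches: B's body is pwRest (w :: v :: t)
      have hlast : PySem.List.pyGetD ((w :: v :: t).map pwQt) (-1) []
          = ((w :: v :: t).map pwQt).getLast (by simp) :=
        PySem.List.pyGetD_neg_one _ _ (by simp)
      have hB : print_words_alt input count
          = some (String.ofList ("(words: ".toList ++ pwRest (w :: v :: t))) := by
        simp only [print_words_alt]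
        rw [hms]
        have hq : (w :: v :: t).map (fun w => '"' :: (w.toList ++ ['"'])) = (w :: v :: t).map pwQt := rfl
        rw [hq]
        have hlen1 : ¬ ((w :: v :: t).map pwQt).length = 1 := by simp
        rw [if_neg (by simp), if_neg hlen1, PySem.List.slice_to_neg_one, hlast]
        rw [← pwJoin_eq_rest w v t]
        simp [List.append_assoc]
      rw [hB]
      rcases t with _ | ⟨u, t⟩
      · -- exactly two
        simp only [print_words]
        rw [hnum, hms]
        norm_num
        rw [PySem.List.foldl_congr_mem _ _ (fun (s : List Char × Int) word =>
            if PySem.Str.len word == count then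
              (if s.2 < (2:Int) - 1 then (s.1 ++ ('"' :: word.toList ++ ['"', ' ']), s.2 + 1)
               else (s.1 ++ ("and \"".toList ++ word.toList ++ ['"', ')']), s.2))
            else s) _ (by
          intro acc x _
          by_cases hpw : (x.length : Int) = count <;> simp [hpw])]
        rw [PySem.List.foldl_if_eq_foldl_filter, hms]
        norm_num [pwRest, pwQt]
      · -- three or more
        simp only [print_words]
        rw [hnum, hms]
        have hne0 : ¬ ((↑(w :: v :: u :: t).length : Int) = 0) := by
          simp only [List.length_cons]; push_cast; omega
        have hne1 : ¬ ((↑(w :: v :: u :: t).length : Int) = 1) := by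
          simp only [List.length_cons]; push_cast; omega
        have hne2 : ¬ ((↑(w :: v :: u :: t).length : Int) = 2) := by
          simp only [List.length_cons]; push_cast; omega
        rw [if_neg hne0, if_neg hne1, if_neg hne2]
        rw [PySem.List.foldl_congr_mem _ _ (fun (s : List Char × Int) word =>
            if PySem.Str.len word == count then
              (if s.2 < (↑(w :: v :: u :: t).length : Int) - 2 then
                (s.1 ++ ('"' :: word.toList ++ ['"', ',', ' ']), s.2 + 1)
               else if s.2 < (↑(w :: v :: u :: t).length : Int) - 1 then
                (s.1 ++ ('"' :: word.toList ++ ['"', ' ']), s.2 + 1)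
               else (s.1 ++ ("and \"".toList ++ word.toList ++ ['"', ')']), s.2))
            else s) _ (by
          intro acc x _
          by_cases hpw : (x.length : Int) = count <;> simp [hpw])]
        rw [PySem.List.foldl_if_eq_foldl_filter, hms]
        rw [pwLoop3 (↑(w :: v :: u :: t).length) (w :: v :: u :: t) _ 0 (by simp) (by ring)]

-- ===== VERDICT (by name: the statement is the Claim_ definition above) =====
theorem print_words_spec : Claim_equal_print_words := by
  intro input count _
  exact print_words_eq input count
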